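-- pv_equiv track=rewrite | github.com/KuroginQin/PRGPT | PRGPT_static.py | clus_reorder
-- ===== SOURCE A (Python) =====
-- def clus_reorder(num_nodes, clus_res):
--     '''
--     Function to reorder the label assignment of a GP result
--     :param num_nodes: number of nodes
--     :param clus_res: label assignment to be reordered
--     :return:
--     '''
--     clus_res_ = []
--     lbl_cnt = 0
--     lbl_map = {}
--     for i in range(num_nodes):
--         lbl = clus_res[i]
--         if lbl not in lbl_map:
--             lbl_map[lbl] = lbl_cnt
--             clus_res_.append(lbl_cnt)
--             lbl_cnt += 1
--         else:
--             clus_res_.append(lbl_map[lbl])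
--
--     return clus_res_, lbl_cnt
-- ===== SOURCE B (Python) =====
-- def clus_reorder(num_nodes, clus_res):
--     # Offline sort-based relabelling instead of A's online counter: record each
--     # label's FIRST occurrence index by overwriting in a reversed pass (no
--     # membership test), sort the distinct labels by that index, and map every
--     # position through the resulting rank table.
--     prefix = [clus_res[i] for i in range(num_nodes)]
--     first = {lbl: i for i, lbl in reversed(list(enumerate(prefix)))}  # earliest index survives
--     by_first = sorted(first, key=first.get)
--     rank = {lbl: r for r, lbl in enumerate(by_first)}
--     return [rank[lbl] for lbl in prefix], len(by_first)
-- ===== Notes on version B (the rewrite author's own statement) =====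
-- stated objective: alternative
-- what changed: Replaces A's online relabelling (one stateful pass updating a dict, a counter and the output together) by an offline sort-based scheme: first-occurrence indices are collected by overwriting in a reversed pass with no membership test, the distinct labels are sorted by that index, and the output is a pure rank lookup.
import Mathlib
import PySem

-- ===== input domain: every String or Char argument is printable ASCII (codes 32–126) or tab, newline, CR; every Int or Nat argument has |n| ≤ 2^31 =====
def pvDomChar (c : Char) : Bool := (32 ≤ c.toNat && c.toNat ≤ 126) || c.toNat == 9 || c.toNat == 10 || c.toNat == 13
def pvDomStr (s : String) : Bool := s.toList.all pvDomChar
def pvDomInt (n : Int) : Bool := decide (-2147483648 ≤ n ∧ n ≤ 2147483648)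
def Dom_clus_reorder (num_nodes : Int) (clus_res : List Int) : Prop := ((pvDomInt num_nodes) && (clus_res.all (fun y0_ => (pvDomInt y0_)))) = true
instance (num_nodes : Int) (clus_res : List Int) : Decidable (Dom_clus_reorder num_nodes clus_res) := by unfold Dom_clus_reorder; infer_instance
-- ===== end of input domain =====

-- B replaces A's online relabelling (one stateful pass over a dict + counter) by an
-- offline sort-based scheme: first-occurrence indices via a reversed overwrite pass,
-- distinct labels sorted by that index, then a pure rank lookup (alternative, same order of cost).

-- ===== PORT A =====
-- one loop step of A: state is (clus_res_, lbl_cnt, lbl_map); `clus_res[i]` is ported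
-- as pyGetD (exact for 0 ≤ i < len, which Pre_ guarantees for every index of range(num_nodes))
def clusAStep (clus_res : List Int) (st : List Int × Int × PySem.Dict Int Int) (i : Int) :
    List Int × Int × PySem.Dict Int Int :=
  let lbl := PySem.List.pyGetD clus_res i 0
  if st.2.2.contains lbl = false then
    (st.1 ++ [st.2.1], st.2.1 + 1, st.2.2.insert lbl st.2.1)
  else
    (st.1 ++ [st.2.2.getD lbl 0], st.2.1, st.2.2)

def clus_reorder (num_nodes : Int) (clus_res : List Int) : List Int × Int :=
  let st := (PySem.List.pyRange 0 num_nodes 1).foldl (clusAStep clus_res) ([], 0, PySem.Dict.empty)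
  (st.1, st.2.1)

-- ===== PORT B =====
def clus_reorder_alt (num_nodes : Int) (clus_res : List Int) : List Int × Int :=
  -- prefix = [clus_res[i] for i in range(num_nodes)]
  let pfx := (PySem.List.pyRange 0 num_nodes 1).map (fun i => PySem.List.pyGetD clus_res i 0)
  -- first = {lbl: i for i, lbl in reversed(list(enumerate(prefix)))}
  let first := ((PySem.List.enumerate pfx 0).reverse).foldl
      (fun d q => d.insert q.2 q.1) PySem.Dict.empty
  -- by_first = sorted(first, key=first.get); every key of `first` is present, so first.get is getD with a dummy default
  let byFirst := PySem.List.sorted first.keys (fun l => first.getD l 0)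
  -- rank = {lbl: r for r, lbl in enumerate(by_first)}
  let rank := (PySem.List.enumerate byFirst 0).foldl
      (fun d q => d.insert q.2 q.1) PySem.Dict.empty
  -- return [rank[lbl] for lbl in prefix], len(by_first); rank[lbl] never misses
  (pfx.map (fun l => rank.getD l 0), (byFirst.length : Int))

-- ===== PRECONDITION & SPEC =====
-- A raises IndexError at clus_res[i] as soon as num_nodes exceeds len(clus_res)
def Pre_clus_reorder (num_nodes : Int) (clus_res : List Int) : Prop :=
  num_nodes ≤ (clus_res.length : Int)
instance (num_nodes : Int) (clus_res : List Int) : Decidable (Pre_clus_reorder num_nodes clus_res) := by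
  unfold Pre_clus_reorder; infer_instance
def pvWitness_clus_reorder : Int × List Int := (3, [7, 7, 2])

def Spec_clus_reorder (num_nodes : Int) (clus_res : List Int) (out : List Int × Int) : Prop := out = clus_reorder_alt num_nodes clus_res
instance (num_nodes : Int) (clus_res : List Int) (out : List Int × Int) : Decidable (Spec_clus_reorder num_nodes clus_res out) := by unfold Spec_clus_reorder; infer_instance

-- ===== CLAIM (what is proved, stated in full; the proofs are below) =====
def Claim_equal_clus_reorder : Prop := ∀ (num_nodes : Int) (clus_res : List Int), Dom_clus_reorder num_nodes clus_res → Pre_clus_reorder num_nodes clus_res → Spec_clus_reorder num_nodes clus_res (clus_reorder num_nodes clus_res)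

-- ===== LEMMAS AND PROOFS =====

-- first-occurrence index of l in p, as the Int both sides compute
def fidx (p : List Int) (l : Int) : Int := (((PySem.List.index? p l).getD 0 : Nat) : Int)

-- A's dict after the prefix p has been processed
def seenDict (p : List Int) : PySem.Dict Int Int :=
  p.foldl (fun m lbl => if m.contains lbl = false then m.insert lbl m.size else m)
    PySem.Dict.empty

lemma seenDict_append (p : List Int) (y : Int) :
    seenDict (p ++ [y]) =
      if (seenDict p).contains y = false then (seenDict p).insert y (seenDict p).size
      else seenDict p := by
  simp [seenDict, List.foldl_append]

lemma seenDict_contains_iff (p : List Int) (x : Int) :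
    (seenDict p).contains x = true ↔ x ∈ p := by
  induction p using List.reverseRecOn with
  | nil => simp [seenDict, PySem.Dict.contains_empty]
  | append_singleton p y ih =>
    rw [seenDict_append]
    by_cases hc : (seenDict p).contains y = false
    · simp only [hc, if_true, PySem.Dict.contains_insert, List.mem_append, List.mem_singleton]
      constructor
      · intro h
        rcases Bool.or_eq_true_iff.mp h with h | h
        · right; exact (beq_iff_eq).mp h
        · left; exact ih.mp h
      · intro h
        rcases h with h | h
        · exact Bool.or_eq_true_iff.mpr (Or.inr (ih.mpr h))
        · exact Bool.or_eq_true_iff.mpr (Or.inl (beq_iff_eq.mpr h))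
    · have hc' : (seenDict p).contains y = true := by simpa using hc
      rw [hc', if_neg (by simp)]
      rw [ih]
      constructor
      · intro h; exact List.mem_append.mpr (Or.inl h)
      · intro h
        rcases List.mem_append.mp h with h | h
        · exact h
        · simp at h; subst h; exact ih.mp hc'

lemma dedup_append_singleton (p : List Int) (y : Int) :
    PySem.List.dedup (p ++ [y]) =
      if y ∈ p then PySem.List.dedup p else PySem.List.dedup p ++ [y] := by
  simp only [PySem.List.dedup_eq_ofList, PySem.Set.ofList_eq_foldl, List.foldl_append,
    List.foldl_cons, List.foldl_nil]
  rw [show ∀ s : PySem.Set Int, PySem.Set.add s y = if PySem.Set.contains s y then s else s ++ [y] from fun s => rfl]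
  have hfold : List.foldl PySem.Set.add [] p = PySem.Set.ofList p :=
    (PySem.Set.ofList_eq_foldl p).symm
  rw [hfold]
  by_cases h : y ∈ p
  · simp [h]
  · simp [h]

lemma seenDict_size (p : List Int) :
    (seenDict p).size = (PySem.List.dedup p).length := by
  induction p using List.reverseRecOn with
  | nil => simp [seenDict, PySem.List.dedup, PySem.Dict.size_empty]
  | append_singleton p y ih =>
    rw [seenDict_append, dedup_append_singleton]
    by_cases h : y ∈ p
    · have hc : (seenDict p).contains y = true := (seenDict_contains_iff p y).mpr h
      rw [hc, if_neg (by simp), if_pos h, ih]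
    · have hc : (seenDict p).contains y = false := by
        rcases Bool.eq_false_or_eq_true ((seenDict p).contains y) with h' | h'
        · exact absurd ((seenDict_contains_iff p y).mp h') h
        · exact h'
      rw [hc, if_pos rfl, if_neg h, PySem.Dict.size_insert, if_neg (by simp [hc]), ih]
      simp

lemma seenDict_getD (p : List Int) (l : Int) (h : l ∈ p) :
    (seenDict p).getD l 0 = fidx (PySem.List.dedup p) l := by
  induction p using List.reverseRecOn with
  | nil => simp at h
  | append_singleton p y ih =>
    rw [seenDict_append, dedup_append_singleton]
    by_cases hy : y ∈ p
    · have hc : (seenDict p).contains y = true := (seenDict_contains_iff p y).mpr hy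
      rw [hc, if_neg (by simp), if_pos hy]
      have hl : l ∈ p := by
        rcases List.mem_append.mp h with h' | h'
        · exact h'
        · simp at h'; subst h'; exact hy
      exact ih hl
    · have hc : (seenDict p).contains y = false := by
        rcases Bool.eq_false_or_eq_true ((seenDict p).contains y) with h' | h'
        · exact absurd ((seenDict_contains_iff p y).mp h') hy
        · exact h'
      rw [hc, if_pos rfl, if_neg hy]
      by_cases hl : l ∈ p
      · have hne : l ≠ y := fun e => hy (e ▸ hl)
        rw [PySem.Dict.getD_insert_of_ne _ _ _ hne, ih hl]
        unfold fidx
        rw [PySem.List.index?_append_of_mem _ (by simp [hl])]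
      · have hly : l = y := by
          rcases List.mem_append.mp h with h' | h'
          · exact absurd h' hl
          · simpa using h'
        subst hly
        rw [PySem.Dict.getD_insert_self]
        unfold fidx
        rw [PySem.List.index?_append_singleton_self _ _ (by simp [hl])]
        rw [seenDict_size]
        simp

-- the invariant tying A's fold state over range(n) to the canonical form
lemma clusA_invariant (clus_res : List Int) (n : Nat) (hn : n ≤ clus_res.length) :
    (PySem.List.pyRange 0 (n : Int) 1).foldl (clusAStep clus_res) ([], 0, PySem.Dict.empty) =
      ((clus_res.take n).map (fun lbl => (seenDict (clus_res.take n)).getD lbl 0),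
       ((seenDict (clus_res.take n)).size : Int), seenDict (clus_res.take n)) := by
  induction n with
  | zero =>
    show (PySem.List.pyRange 0 ((0:Nat):Int) 1).foldl _ _ = _
    norm_num [seenDict, PySem.List.pyRange, PySem.Dict.size, PySem.Dict.empty]
  | succ n ih =>
    have hlt : n < clus_res.length := by omega
    have hcast : (((n+1:Nat)):Int) = (n:Int) + 1 := by push_cast; ring
    rw [hcast, PySem.List.pyRange_one_succ_right (by positivity), List.foldl_append,
      ih (by omega)]
    have htake : clus_res.take (n+1) = clus_res.take n ++ [clus_res[n]] := by
      rw [List.take_add_one]; simp [List.getElem?_eq_getElem hlt]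
    set p := clus_res.take n with hp
    set e := clus_res[n] with he
    have hlbl : PySem.List.pyGetD clus_res ((n:Nat):Int) 0 = e := by
      rw [PySem.List.pyGetD_natCast]; exact List.getD_eq_getElem _ _ hlt
    rw [htake, seenDict_append]
    by_cases hc : (seenDict p).contains e = false
    · have hne : ∀ x ∈ p, x ≠ e := by
        intro x hx hxe
        have hcx := (seenDict_contains_iff p x).mpr hx
        rw [hxe, hc] at hcx
        exact absurd hcx (by simp)
      have hmap : List.map (fun lbl => ((seenDict p).insert e ((seenDict p).size:Int)).getD lbl 0) p
          = List.map (fun lbl => (seenDict p).getD lbl 0) p :=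
        List.map_congr_left (fun x hx => PySem.Dict.getD_insert_of_ne _ _ _ (hne x hx))
      simp [clusAStep, hlbl, hc, hmap, PySem.Dict.size_insert, PySem.Dict.getD_insert_self]
    · have hc' : (seenDict p).contains e = true := by simpa using hc
      simp [clusAStep, hlbl, hc']

-- [xs[i] for i in range(n)] is take n (for n ≤ len xs)
lemma map_pyGetD_range_take (xs : List Int) (n : Nat) (hn : n ≤ xs.length) :
    (PySem.List.pyRange 0 (n : Int) 1).map (fun i => PySem.List.pyGetD xs i 0) = xs.take n := by
  induction n with
  | zero =>
    show (PySem.List.pyRange 0 ((0:Nat):Int) 1).map _ = _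
    norm_num [PySem.List.pyRange]
  | succ n ih =>
    have hlt : n < xs.length := by omega
    have hcast : (((n+1:Nat)):Int) = (n:Int) + 1 := by push_cast; ring
    rw [hcast, PySem.List.pyRange_one_succ_right (by positivity), List.map_append,
      ih (by omega)]
    have htake : xs.take (n+1) = xs.take n ++ [xs[n]] := by
      rw [List.take_add_one]; simp [List.getElem?_eq_getElem hlt]
    rw [htake]
    simp [PySem.List.pyGetD_natCast, List.getElem?_eq_getElem hlt]

-- B's reversed-overwrite dict: lookup is the FIRST occurrence index
lemma firstDict_get? (p : List Int) (d : PySem.Dict Int Int) (l : Int) :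
    (((PySem.List.enumerate p 0).reverse).foldl (fun d q => d.insert q.2 q.1) d).get? l =
      if l ∈ p then some (fidx p l) else d.get? l := by
  induction p using List.reverseRecOn generalizing d with
  | nil => simp [PySem.List.enumerate]
  | append_singleton p y ih =>
    rw [PySem.List.enumerate_append]
    have hone : PySem.List.enumerate [y] (0 + (p.length : Int)) = [((p.length : Int), y)] := by
      simp [PySem.List.enumerate]
    rw [hone, List.reverse_append, List.reverse_singleton, List.singleton_append,
      List.foldl_cons, ih]
    by_cases hl : l ∈ p
    · rw [if_pos hl, if_pos (List.mem_append.mpr (Or.inl hl))]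
      unfold fidx
      rw [PySem.List.index?_append_of_mem _ hl]
    · rw [if_neg hl]
      by_cases hly : l = y
      · subst hly
        rw [if_pos (by simp), PySem.Dict.get?_insert_self]
        unfold fidx
        rw [PySem.List.index?_append_singleton_self _ _ hl]
        simp
      · rw [if_neg (by simp [hl, hly]), PySem.Dict.get?_insert_of_ne _ _ hly]

lemma firstDict_keys (p : List Int) :
    (((PySem.List.enumerate p 0).reverse).foldl (fun d q => d.insert q.2 q.1)
      (PySem.Dict.empty : PySem.Dict Int Int)).keys = PySem.Set.ofList p.reverse := by
  rw [PySem.Dict.keys_foldl_insert_key ((PySem.List.enumerate p 0).reverse)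
    (fun q => q.2) (fun _ q => q.1) PySem.Dict.empty]
  rw [PySem.Dict.keys_empty]
  have : List.map (fun q : Int × Int => q.2) ((PySem.List.enumerate p 0).reverse)
      = p.reverse := by
    rw [List.map_reverse, PySem.List.map_snd_enumerate]
  rw [this]
  rfl

-- first-appearance order has strictly increasing first indices
lemma pairwise_fidx_dedup (p : List Int) :
    (PySem.List.dedup p).Pairwise (fun a b => fidx p a < fidx p b) := by
  induction p using List.reverseRecOn with
  | nil => simp [PySem.List.dedup]
  | append_singleton p y ih =>
    rw [dedup_append_singleton]
    have hkeep : ∀ x ∈ PySem.List.dedup p, fidx (p ++ [y]) x = fidx p x := by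
      intro x hx
      unfold fidx
      rw [PySem.List.index?_append_of_mem _ ((PySem.List.mem_dedup p x).mp hx)]
    by_cases hy : y ∈ p
    · rw [if_pos hy]
      exact ih.imp_of_mem (fun ha hb hr => by
        rw [hkeep _ ha, hkeep _ hb]; exact hr)
    · rw [if_neg hy]
      rw [List.pairwise_append]
      refine ⟨ih.imp_of_mem (fun ha hb hr => by rw [hkeep _ ha, hkeep _ hb]; exact hr),
        by simp, ?_⟩
      intro a ha b hb
      simp only [List.mem_singleton] at hb
      rw [hb, hkeep _ ha]
      have hap : a ∈ p := (PySem.List.mem_dedup p a).mp ha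
      have hsome := (PySem.List.index?_isSome_iff p a).mpr hap
      obtain ⟨k, hk⟩ := Option.isSome_iff_exists.mp hsome
      obtain ⟨hklt, -, -⟩ := PySem.List.getElem_of_index?_eq_some hk
      have hby : fidx (p ++ [y]) y = (p.length : Int) := by
        unfold fidx
        rw [PySem.List.index?_append_singleton_self _ _ hy]
        simp
      rw [hby]
      unfold fidx
      rw [hk]
      simp
      omega

lemma firstDict_getD_mem (p : List Int) (l : Int) (h : l ∈ p) :
    (((PySem.List.enumerate p 0).reverse).foldl (fun d q => d.insert q.2 q.1)
      (PySem.Dict.empty : PySem.Dict Int Int)).getD l 0 = fidx p l := by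
  rw [PySem.Dict.getD_eq_get?_getD, firstDict_get?, if_pos h]
  rfl

-- sorting the keys by first index recovers first-appearance order
lemma sorted_keys_eq_dedup (p : List Int) :
    PySem.List.sorted
      (((PySem.List.enumerate p 0).reverse).foldl (fun d q => d.insert q.2 q.1)
        (PySem.Dict.empty : PySem.Dict Int Int)).keys
      (fun l =>
        (((PySem.List.enumerate p 0).reverse).foldl (fun d q => d.insert q.2 q.1)
          (PySem.Dict.empty : PySem.Dict Int Int)).getD l 0)
      = PySem.List.dedup p := by
  apply PySem.List.sorted_eq_of_perm_of_pairwise_lt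
  · rw [List.perm_ext_iff_of_nodup (PySem.List.nodup_dedup p)
      (by rw [firstDict_keys]; exact PySem.Set.nodup_ofList _)]
    intro a
    rw [firstDict_keys, PySem.Set.mem_ofList, List.mem_reverse, PySem.List.mem_dedup]
  · exact (pairwise_fidx_dedup p).imp_of_mem (fun ha hb hr => by
      rw [firstDict_getD_mem p _ ((PySem.List.mem_dedup p _).mp ha),
        firstDict_getD_mem p _ ((PySem.List.mem_dedup p _).mp hb)]
      exact hr)

-- the rank dict built from a duplicate-free list L maps l to its index in L
lemma rankDict_getD (L : List Int) (hnd : L.Nodup) (l : Int) (h : l ∈ L) :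
    ((PySem.List.enumerate L 0).foldl (fun d q => d.insert q.2 q.1)
      (PySem.Dict.empty : PySem.Dict Int Int)).getD l 0 = fidx L l := by
  have hsome := (PySem.List.index?_isSome_iff L l).mpr h
  obtain ⟨k, hk⟩ := Option.isSome_iff_exists.mp hsome
  obtain ⟨hklt, hget, -⟩ := PySem.List.getElem_of_index?_eq_some hk
  have hitems := PySem.Dict.items_foldl_insert_fresh (PySem.List.enumerate L 0)
    (fun q : Int × Int => q.2) (fun q : Int × Int => q.1)
    (PySem.Dict.empty : PySem.Dict Int Int)
    (fun a _ => PySem.Dict.contains_empty _)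
    (by rw [PySem.List.map_snd_enumerate]; exact hnd)
  have hmem : (l, (k : Int)) ∈ ((PySem.List.enumerate L 0).foldl
      (fun d q => d.insert q.2 q.1) (PySem.Dict.empty : PySem.Dict Int Int)).items := by
    rw [hitems]
    have : (PySem.Dict.empty : PySem.Dict Int Int).items = [] := rfl
    rw [this, List.nil_append, List.mem_map]
    refine ⟨((k : Int), l), ?_, rfl⟩
    rw [PySem.List.mem_enumerate_iff]
    exact ⟨k, hklt, by rw [hget]; simp⟩
  rw [PySem.Dict.getD_of_mem_items _ hmem
    (PySem.Dict.nodup_keys_foldl_insert_key _ _ _ _ (by simp [PySem.Dict.keys_empty]))]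
  unfold fidx
  rw [hk]
  rfl

lemma clus_main (num_nodes : Int) (clus_res : List Int)
    (hpre : num_nodes ≤ (clus_res.length : Int)) :
    clus_reorder num_nodes clus_res = clus_reorder_alt num_nodes clus_res := by
  by_cases h : 0 ≤ num_nodes
  · obtain ⟨n, rfl⟩ := Int.eq_ofNat_of_zero_le h
    have hn : n ≤ clus_res.length := by exact_mod_cast hpre
    have hA : clus_reorder (n : Int) clus_res =
        ((clus_res.take n).map (fun l => fidx (PySem.List.dedup (clus_res.take n)) l),
         ((PySem.List.dedup (clus_res.take n)).length : Int)) := by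
      unfold clus_reorder
      simp only [clusA_invariant clus_res n hn]
      refine Prod.ext ?_ ?_
      · exact List.map_congr_left (fun l hl => seenDict_getD _ _ hl)
      · simp [seenDict_size]
    have hB : clus_reorder_alt (n : Int) clus_res =
        ((clus_res.take n).map (fun l => fidx (PySem.List.dedup (clus_res.take n)) l),
         ((PySem.List.dedup (clus_res.take n)).length : Int)) := by
      unfold clus_reorder_alt
      simp only [map_pyGetD_range_take clus_res n hn, sorted_keys_eq_dedup]
      refine Prod.ext ?_ ?_
      · exact List.map_congr_left (fun l hl =>
          rankDict_getD _ (PySem.List.nodup_dedup _) l ((PySem.List.mem_dedup _ l).mpr hl))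
      · rfl
    rw [hA, hB]
  · have hempty : PySem.List.pyRange 0 num_nodes 1 = [] := by
      rw [PySem.List.pyRange_one]
      have : (num_nodes - 0).toNat = 0 := by omega
      rw [this]
      simp
    simp [clus_reorder, clus_reorder_alt, hempty, PySem.Dict.keys_empty, PySem.List.sorted]

-- ===== VERDICT (by name: the statement is the Claim_ definition above) =====
theorem clus_reorder_spec : Claim_equal_clus_reorder := by
  intro num_nodes clus_res _ hpre
  unfold Spec_clus_reorder
  exact clus_main num_nodes clus_res hpre
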